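-- pv_equiv track=rewrite | github.com/tlopex/tvm | python/tvm/script/printer/python_printer.py | _optimize_generated_code
-- ===== SOURCE A (Python) =====
-- def _optimize_generated_code(code: str) -> str:
--     """Optimize the generated Python code to remove unused variables."""
--     lines = code.split('\n')
--     optimized_lines = []
--
--     # Track variable definitions and usage
--     defined_vars = set()
--     used_vars = set()
--
--     for i, line in enumerate(lines):
--         line_stripped = line.strip()
--         if not line_stripped or line_stripped.startswith('#'):
--             optimized_lines.append(line)
--             continue
--
--         # Check for variable definitions (e.g., "n = x.shape[0]")
--         if ' = ' in line_stripped and 'x.shape[' in line_stripped: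
--             var_name = line_stripped.split(' = ')[0].strip()
--             defined_vars.add(var_name)
--             # Check if this variable is used in subsequent lines
--             is_used = False
--             for future_line in lines[i + 1:]:
--                 future_line_stripped = future_line.strip()
--                 if var_name in future_line_stripped and not future_line_stripped.startswith(var_name + ' ='):
--                     is_used = True
--                     used_vars.add(var_name)
--                     break
--
--             # Only add the line if the variable is actually used
--             if is_used:
--                 optimized_lines.append(line)
--             else:
--                 # Add a comment explaining why we're not generating this
--                 # Extract the actual shape dimension from the original line
--                 shape_dim = line_stripped.split('x.shape[')[1].split(']')[0]
--                 optimized_lines.append(f"    # {var_name} = x.shape[{shape_dim}]  # Not used in function body")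
--         else:
--             # Check for variable usage in this line
--             for var in defined_vars:
--                 if var in line_stripped and not line_stripped.startswith(var + ' ='):
--                     used_vars.add(var)
--             optimized_lines.append(line)
--
--     return '\n'.join(optimized_lines)
-- ===== SOURCE B (Python) =====
-- def _optimize_generated_code(code: str) -> str:
--     """Optimize the generated Python code to remove unused variables."""
--     lines = code.split('\n')
--     out = []
--     # pending: (slot, var_name, original_line); out[slot] currently holds the
--     # "Not used" comment and is overwritten with the original line on first use.
--     pending = []
--     for line in lines:
--         stripped = line.strip()
--         still = []
--         for slot, var, orig in pending:
--             if var in stripped and not stripped.startswith(var + ' ='):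
--                 out[slot] = orig
--             else:
--                 still.append((slot, var, orig))
--         pending = still
--         if stripped and not stripped.startswith('#') and ' = ' in stripped and 'x.shape[' in stripped:
--             var = stripped.split(' = ')[0].strip()
--             dim = stripped.split('x.shape[')[1].split(']')[0]
--             out.append(f"    # {var} = x.shape[{dim}]  # Not used in function body")
--             pending.append((len(out) - 1, var, line))
--         else:
--             out.append(line)
--     return '\n'.join(out)
-- ===== Notes on version B (the rewrite author's own statement) =====
-- stated objective: alternative
-- what changed: Replaces A's per-definition rescan of all later lines (plus dead defined_vars/used_vars sets) by a single forward pass that keeps a list of pending definitions and patches each one's output slot in place when its variable is first used; still-unresolved slots already hold the same unused-variable comment A emits.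
import Mathlib
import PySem

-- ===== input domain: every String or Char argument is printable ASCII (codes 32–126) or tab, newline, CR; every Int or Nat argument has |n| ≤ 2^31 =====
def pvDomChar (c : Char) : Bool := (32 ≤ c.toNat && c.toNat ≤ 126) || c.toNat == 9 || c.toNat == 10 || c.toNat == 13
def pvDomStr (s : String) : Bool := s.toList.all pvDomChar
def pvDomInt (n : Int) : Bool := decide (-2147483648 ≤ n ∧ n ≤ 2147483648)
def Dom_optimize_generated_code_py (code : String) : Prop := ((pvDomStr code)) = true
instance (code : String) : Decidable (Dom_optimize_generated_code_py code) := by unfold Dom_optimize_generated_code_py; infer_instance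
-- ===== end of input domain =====

-- B replaces A's per-definition rescans of all later lines by ONE forward pass keeping a
-- list of pending definitions patched in place when first used (objective: alternative).

-- ===== PORT A =====
-- inner 'for future_line in lines[i + 1:]: … break' loop of A (returns (is_used, used_vars))
def pvUsedScanA (var : String) (uv : PySem.Set String) :
    List String → Bool × PySem.Set String
  | [] => (false, uv)
  | fl :: rest =>
    let fls := PySem.Str.strip fl
    if PySem.Str.isIn var fls && !(PySem.Str.startswith fls (var ++ " =")) then
      (true, PySem.Set.add uv var)
    else pvUsedScanA var uv rest

-- one iteration of A's main 'for i, line in enumerate(lines)' loop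
def pvStepA (lines : List String) (st : List String × PySem.Set String × PySem.Set String)
    (p : Int × String) : List String × PySem.Set String × PySem.Set String :=
  let line := p.2
  let s := PySem.Str.strip line
  if s == "" || PySem.Str.startswith s "#" then (st.1 ++ [line], st.2.1, st.2.2)
  else if PySem.Str.isIn " = " s && PySem.Str.isIn "x.shape[" s then
    let var := PySem.Str.strip (((PySem.Str.split? s " = ").getD []).headD "")
    let dv' := PySem.Set.add st.2.1 var
    let r := pvUsedScanA var st.2.2 (PySem.List.slice lines (some (p.1 + 1)) none)
    if r.1 then (st.1 ++ [line], dv', r.2)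
    else
      -- split('x.shape[')[1] is in range because 'x.shape[' occurs in s (guard above)
      let dim := ((PySem.Str.split? (PySem.List.pyGetD ((PySem.Str.split? s "x.shape[").getD []) 1 "") "]").getD []).headD ""
      (st.1 ++ ["    # " ++ var ++ " = x.shape[" ++ dim ++ "]  # Not used in function body"], dv', r.2)
  else
    -- 'for var in defined_vars: used_vars.add(var) if …' (adds only; resulting SET is order-independent)
    let uv' := st.2.1.foldl (fun (uv : PySem.Set String) var =>
      if PySem.Str.isIn var s && !(PySem.Str.startswith s (var ++ " =")) then PySem.Set.add uv var else uv) st.2.2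
    (st.1 ++ [line], st.2.1, uv')

def optimize_generated_code_py (code : String) : String :=
  let lines := (PySem.Str.split? code "\n").getD []
  PySem.Str.join "\n"
    ((PySem.List.enumerate lines).foldl (pvStepA lines)
      ([], PySem.Set.ofList [], PySem.Set.ofList [])).1

-- ===== PORT B =====
-- one iteration of B's loop; pending entries are (slot, var_name, original_line),
-- out[slot] holds the "Not used" comment until the variable is first used
def pvStepB (st : List String × List (Nat × String × String)) (line : String) :
    List String × List (Nat × String × String) :=
  let s := PySem.Str.strip line
  -- 'for slot, var, orig in pending: …' (out[slot] = orig is in range: slot < len(out) always)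
  let q := st.2.foldl (fun (q : List String × List (Nat × String × String)) e =>
      if PySem.Str.isIn e.2.1 s && !(PySem.Str.startswith s (e.2.1 ++ " =")) then
        (q.1.set e.1 e.2.2, q.2)
      else (q.1, q.2 ++ [e])) (st.1, [])
  if !(s == "") && !(PySem.Str.startswith s "#") && PySem.Str.isIn " = " s && PySem.Str.isIn "x.shape[" s then
    let var := PySem.Str.strip (((PySem.Str.split? s " = ").getD []).headD "")
    let dim := ((PySem.Str.split? (PySem.List.pyGetD ((PySem.Str.split? s "x.shape[").getD []) 1 "") "]").getD []).headD ""
    (q.1 ++ ["    # " ++ var ++ " = x.shape[" ++ dim ++ "]  # Not used in function body"],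
     q.2 ++ [(q.1.length, var, line)])
  else (q.1 ++ [line], q.2)

def optimize_generated_code_py_alt (code : String) : String :=
  let lines := (PySem.Str.split? code "\n").getD []
  PySem.Str.join "\n" (lines.foldl pvStepB ([], [])).1

-- ===== PRECONDITION & SPEC =====
def Spec_optimize_generated_code_py (code : String) (out : String) : Prop := out = optimize_generated_code_py_alt code
instance (code : String) (out : String) : Decidable (Spec_optimize_generated_code_py code out) := by unfold Spec_optimize_generated_code_py; infer_instance

-- ===== CLAIM (what is proved, stated in full; the proofs are below) =====
def Claim_equal_optimize_generated_code_py : Prop := ∀ (code : String), Dom_optimize_generated_code_py code → Spec_optimize_generated_code_py code (optimize_generated_code_py code)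

-- ===== LEMMAS AND PROOFS =====

-- 'var in s and not s.startswith(var + " =")' on an (already stripped) line s
def pvUse (var s : String) : Bool :=
  PySem.Str.isIn var s && !(PySem.Str.startswith s (var ++ " ="))

def pvUseL (var l : String) : Bool := pvUse var (PySem.Str.strip l)

-- the guard for the definition branch, on the stripped line
def pvDefC (s : String) : Bool :=
  !(s == "") && !(PySem.Str.startswith s "#") && PySem.Str.isIn " = " s && PySem.Str.isIn "x.shape[" s

def pvVar (s : String) : String :=
  PySem.Str.strip (((PySem.Str.split? s " = ").getD []).headD "")

def pvCmt (s : String) : String :=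
  "    # " ++ pvVar s ++ " = x.shape[" ++
    ((PySem.Str.split? (PySem.List.pyGetD ((PySem.Str.split? s "x.shape[").getD []) 1 "") "]").getD []).headD ""
    ++ "]  # Not used in function body"

-- common reference semantics: per line, a definition line stays iff some later line uses its variable
def pvGo : List String → List String
  | [] => []
  | l :: rest =>
    let s := PySem.Str.strip l
    (if pvDefC s then (if rest.any (pvUseL (pvVar s)) then l else pvCmt s) else l) :: pvGo rest

-- ---- A-side ----
theorem pvUsedScanA_fst (var : String) (uv : PySem.Set String) (ls : List String) :
    (pvUsedScanA var uv ls).1 = ls.any (pvUseL var) := by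
  induction ls generalizing uv with
  | nil => rfl
  | cons l rest ih =>
    simp only [pvUsedScanA, List.any_cons, pvUseL, pvUse]
    split <;> simp_all

theorem pvDefC_false_blank (s : String)
    (h : (s == "" || PySem.Str.startswith s "#") = true) : pvDefC s = false := by
  unfold pvDefC
  rcases Bool.or_eq_true_iff.mp h with h' | h' <;>
    simp only [h', Bool.not_true, Bool.false_and, Bool.and_false]

theorem pvDefC_true_of (s : String)
    (h1 : (s == "" || PySem.Str.startswith s "#") = false)
    (h2 : (PySem.Str.isIn " = " s && PySem.Str.isIn "x.shape[" s) = true) : pvDefC s = true := by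
  unfold pvDefC
  rcases Bool.or_eq_false_iff.mp h1 with ⟨ha, hb⟩
  rcases Bool.and_eq_true_iff.mp h2 with ⟨hc, hd⟩
  simp only [ha, hb, hc, hd, Bool.not_false, Bool.and_true]

theorem pvDefC_false_of (s : String)
    (h2 : (PySem.Str.isIn " = " s && PySem.Str.isIn "x.shape[" s) = false) : pvDefC s = false := by
  unfold pvDefC
  rcases Bool.and_eq_false_iff.mp h2 with h' | h' <;>
    simp only [h', Bool.and_false, Bool.false_and]

theorem pvStepA_fst (lines : List String)
    (st : List String × PySem.Set String × PySem.Set String) (p : Int × String) :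
    (pvStepA lines st p).1 = st.1 ++
      [if pvDefC (PySem.Str.strip p.2) then
        (if (PySem.List.slice lines (some (p.1 + 1)) none).any (pvUseL (pvVar (PySem.Str.strip p.2)))
          then p.2 else pvCmt (PySem.Str.strip p.2))
       else p.2] := by
  unfold pvStepA
  simp only []
  by_cases h1 : (PySem.Str.strip p.2 == "" || PySem.Str.startswith (PySem.Str.strip p.2) "#") = true
  · simp only [h1, if_true, pvDefC_false_blank _ h1, Bool.false_eq_true, if_false]
  · rw [if_neg (by simp only [Bool.not_eq_true] at h1 ⊢; exact h1)]
    simp only [Bool.not_eq_true] at h1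
    by_cases h2 : (PySem.Str.isIn " = " (PySem.Str.strip p.2) && PySem.Str.isIn "x.shape[" (PySem.Str.strip p.2)) = true
    · simp only [h2, if_true, pvDefC_true_of _ h1 h2, if_true, pvUsedScanA_fst, pvVar]
      by_cases h3 : (PySem.List.slice lines (some (p.1 + 1)) none).any
          (pvUseL (PySem.Str.strip (((PySem.Str.split? (PySem.Str.strip p.2) " = ").getD []).headD ""))) = true
      · simp only [h3, if_true]
      · simp only [Bool.not_eq_true] at h3
        simp only [h3, Bool.false_eq_true, if_false, pvCmt, pvVar]
    · simp only [Bool.not_eq_true] at h2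
      simp only [h2, Bool.false_eq_true, if_false, pvDefC_false_of _ h2]

theorem pvA_loop (suffix : List String) : ∀ (k : Nat) (lines acc : List String)
    (dv uv : PySem.Set String), lines.drop k = suffix →
    ((PySem.List.enumerate suffix (k : Int)).foldl (pvStepA lines) (acc, dv, uv)).1
      = acc ++ pvGo suffix := by
  induction suffix with
  | nil => intro k lines acc dv uv _; simp [PySem.List.enumerate_nil, pvGo]
  | cons l rest ih =>
    intro k lines acc dv uv h
    have hdrop : lines.drop (k + 1) = rest := by
      rw [List.drop_add_one_eq_tail_drop, h]; rfl
    have hsl : PySem.List.slice lines (some ((k : Int) + 1)) none = rest := by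
      have hcast : ((k : Int) + 1) = ((k + 1 : Nat) : Int) := by push_cast; ring
      rw [hcast, PySem.List.slice_from_natCast, hdrop]
    have hk1 : ((k : Int) + 1) = ((k + 1 : Nat) : Int) := by push_cast; ring
    rw [PySem.List.enumerate_cons, List.foldl_cons, hk1]
    have hih := ih (k + 1) lines (pvStepA lines (acc, dv, uv) ((k : Int), l)).1
      (pvStepA lines (acc, dv, uv) ((k : Int), l)).2.1
      (pvStepA lines (acc, dv, uv) ((k : Int), l)).2.2 hdrop
    simp only [Prod.mk.eta] at hih
    rw [hih, pvStepA_fst]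
    simp only [pvGo, hsl, List.append_assoc, List.singleton_append]

-- ---- B-side ----
def pvRunB (st : List String × List (Nat × String × String)) (ls : List String) :
    List String × List (Nat × String × String) := ls.foldl pvStepB st

-- sets of the entries of p resolved by the stripped line s
def pvSetsIf (s : String) (p : List (Nat × String × String)) (o : List String) : List String :=
  p.foldl (fun o e => if pvUse e.2.1 s then o.set e.1 e.2.2 else o) o

-- final patching of pending entries against the remaining lines
def pvPatch (rest : List String) (p : List (Nat × String × String)) (o : List String) : List String :=
  p.foldl (fun o e => if rest.any (pvUseL e.2.1) then o.set e.1 e.2.2 else o) o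

theorem pvSetsIf_cons (s : String) (e : Nat × String × String)
    (p : List (Nat × String × String)) (o : List String) :
    pvSetsIf s (e :: p) o
      = pvSetsIf s p (if pvUse e.2.1 s then o.set e.1 e.2.2 else o) := rfl

theorem pvPatch_cons (r : List String) (e : Nat × String × String)
    (p : List (Nat × String × String)) (o : List String) :
    pvPatch r (e :: p) o
      = pvPatch r p (if r.any (pvUseL e.2.1) then o.set e.1 e.2.2 else o) := rfl

-- B's inner pending loop, in closed form
theorem pvInner (s : String) (p : List (Nat × String × String)) :
    ∀ (o : List String) (acc : List (Nat × String × String)),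
    p.foldl (fun (q : List String × List (Nat × String × String)) e =>
      if PySem.Str.isIn e.2.1 s && !(PySem.Str.startswith s (e.2.1 ++ " =")) then
        (q.1.set e.1 e.2.2, q.2)
      else (q.1, q.2 ++ [e])) (o, acc)
      = (pvSetsIf s p o, acc ++ p.filter (fun e => !pvUse e.2.1 s)) := by
  induction p with
  | nil => intro o acc; simp [pvSetsIf]
  | cons e p ih =>
    intro o acc
    by_cases h : pvUse e.2.1 s = true
    · rw [List.foldl_cons, if_pos (by exact h), ih]
      simp only [pvSetsIf, List.foldl_cons, h, if_true, List.filter_cons, Bool.not_true,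
        Bool.false_eq_true, if_false]
    · simp only [Bool.not_eq_true] at h
      rw [List.foldl_cons, if_neg (by simp [pvUse] at h ⊢; intro hc; simp [hc] at h; exact h), ih]
      simp only [pvSetsIf, List.foldl_cons, h, Bool.false_eq_true, if_false, List.filter_cons,
        Bool.not_false, if_true, List.append_assoc, List.singleton_append]

theorem length_pvSetsIf (s : String) (p : List (Nat × String × String)) :
    ∀ (o : List String), (pvSetsIf s p o).length = o.length := by
  induction p with
  | nil => intro o; rfl
  | cons e p ih =>
    intro o
    by_cases h : pvUse e.2.1 s = true
    · simp only [pvSetsIf, List.foldl_cons, h, if_true] at ih ⊢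
      rw [ih (o.set e.1 e.2.2), List.length_set]
    · simp only [Bool.not_eq_true] at h
      simp only [pvSetsIf, List.foldl_cons, h, Bool.false_eq_true, if_false] at ih ⊢
      exact ih o

-- closed form of one step of B
theorem pvStepB_eq (o : List String) (p : List (Nat × String × String)) (l : String) :
    pvStepB (o, p) l =
      (pvSetsIf (PySem.Str.strip l) p o ++
        (if pvDefC (PySem.Str.strip l) then [pvCmt (PySem.Str.strip l)] else [l]),
       p.filter (fun e => !pvUse e.2.1 (PySem.Str.strip l)) ++
        (if pvDefC (PySem.Str.strip l) then [(o.length, pvVar (PySem.Str.strip l), l)] else [])) := by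
  unfold pvStepB
  simp only [pvInner, List.nil_append]
  by_cases h : pvDefC (PySem.Str.strip l) = true
  · rw [if_pos (show (!(PySem.Str.strip l == "") && !(PySem.Str.startswith (PySem.Str.strip l) "#") && PySem.Str.isIn " = " (PySem.Str.strip l) && PySem.Str.isIn "x.shape[" (PySem.Str.strip l)) = true from h), if_pos h, if_pos h]
    simp only [pvVar, pvCmt, length_pvSetsIf]
  · simp only [Bool.not_eq_true] at h
    have hbody : (!(PySem.Str.strip l == "") && !(PySem.Str.startswith (PySem.Str.strip l) "#") && PySem.Str.isIn " = " (PySem.Str.strip l) && PySem.Str.isIn "x.shape[" (PySem.Str.strip l)) = false := h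
    rw [if_neg (by rw [hbody]; exact Bool.false_ne_true),
      if_neg (by rw [h]; exact Bool.false_ne_true), if_neg (by rw [h]; exact Bool.false_ne_true)]
    simp only [List.append_nil]

theorem pvSetsIf_set (s : String) (p : List (Nat × String × String)) (j : Nat) (v : String)
    (hj : j ∉ p.map (·.1)) : ∀ (o : List String),
    pvSetsIf s p (o.set j v) = (pvSetsIf s p o).set j v := by
  induction p with
  | nil => intro o; rfl
  | cons e p ih =>
    intro o
    simp only [List.map_cons, List.mem_cons, not_or] at hj
    by_cases h : pvUse e.2.1 s = true
    · simp only [pvSetsIf, List.foldl_cons, h, if_true] at ih ⊢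
      rw [List.set_comm _ _ hj.1]
      exact ih hj.2 (o.set e.1 e.2.2)
    · simp only [Bool.not_eq_true] at h
      simp only [pvSetsIf, List.foldl_cons, h, Bool.false_eq_true, if_false] at ih ⊢
      exact ih hj.2 o

theorem pvSetsIf_append (s : String) (p : List (Nat × String × String)) (tp : List String) :
    ∀ (o : List String), (∀ e ∈ p, e.1 < o.length) →
    pvSetsIf s p o ++ tp = pvSetsIf s p (o ++ tp) := by
  induction p with
  | nil => intro o _; rfl
  | cons e p ih =>
    intro o hb
    by_cases h : pvUse e.2.1 s = true
    · simp only [pvSetsIf, List.foldl_cons, h, if_true] at ih ⊢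
      rw [ih (o.set e.1 e.2.2) (fun e' he' => by
          simpa using hb e' (List.mem_cons_of_mem _ he')),
        List.set_append_left _ _ (hb e List.mem_cons_self)]
    · simp only [Bool.not_eq_true] at h
      simp only [pvSetsIf, List.foldl_cons, h, Bool.false_eq_true, if_false] at ih ⊢
      exact ih o (fun e' he' => hb e' (List.mem_cons_of_mem _ he'))

theorem pvRunB_set (ls : List String) : ∀ (o : List String) (p : List (Nat × String × String))
    (j : Nat) (v : String), j < o.length → j ∉ p.map (·.1) →
    (pvRunB (o.set j v, p) ls).1 = ((pvRunB (o, p) ls).1).set j v := by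
  induction ls with
  | nil => intro o p j v hj hjp; rfl
  | cons l ls ih =>
    intro o p j v hj hjp
    show (pvRunB (pvStepB (o.set j v, p) l) ls).1 = ((pvRunB (pvStepB (o, p) l) ls).1).set j v
    rw [pvStepB_eq, pvStepB_eq]
    rw [pvSetsIf_set _ _ _ _ hjp, List.length_set,
      ← List.set_append_left j v (by rw [length_pvSetsIf]; exact hj)]
    apply ih
    · by_cases hd : pvDefC (PySem.Str.strip l) = true <;>
        · simp [hd, length_pvSetsIf]; omega
    · intro hmem
      simp only [List.map_append, List.mem_append] at hmem
      rcases hmem with hmem | hmem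
      · refine hjp ?_
        rcases List.mem_map.mp hmem with ⟨e, he, hej⟩
        exact List.mem_map.mpr ⟨e, List.mem_of_mem_filter he, hej⟩
      · by_cases hd : pvDefC (PySem.Str.strip l) = true <;> simp [hd] at hmem <;> omega

theorem pvPatch_nil (p : List (Nat × String × String)) : ∀ (o : List String),
    pvPatch [] p o = o := by
  induction p with
  | nil => intro o; rfl
  | cons e p ih =>
    intro o
    simp only [pvPatch, List.foldl_cons, List.any_nil, Bool.false_eq_true, if_false] at ih ⊢
    exact ih o

theorem pvPatch_set (r : List String) (p : List (Nat × String × String)) (j : Nat) (v : String)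
    (hj : j ∉ p.map (·.1)) : ∀ (o : List String),
    pvPatch r p (o.set j v) = (pvPatch r p o).set j v := by
  induction p with
  | nil => intro o; rfl
  | cons e p ih =>
    intro o
    simp only [List.map_cons, List.mem_cons, not_or] at hj
    by_cases h : r.any (pvUseL e.2.1) = true
    · simp only [pvPatch, List.foldl_cons, h, if_true] at ih ⊢
      rw [List.set_comm _ _ hj.1]
      exact ih hj.2 (o.set e.1 e.2.2)
    · simp only [Bool.not_eq_true] at h
      simp only [pvPatch, List.foldl_cons, h, Bool.false_eq_true, if_false] at ih ⊢
      exact ih hj.2 o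

theorem pvPatch_nil_p (r : List String) (o : List String) : pvPatch r [] o = o := rfl

theorem pvPatch_append_p (r : List String) (p1 p2 : List (Nat × String × String))
    (o : List String) : pvPatch r (p1 ++ p2) o = pvPatch r p2 (pvPatch r p1 o) := by
  unfold pvPatch; rw [List.foldl_append]

-- merging the current line's resolutions into the patch over the remaining lines
theorem pvPatch_cons_line (l : String) (ls : List String) (p : List (Nat × String × String))
    (hnd : (p.map (·.1)).Nodup) : ∀ (o : List String),
    pvPatch ls (p.filter (fun e => !pvUse e.2.1 (PySem.Str.strip l)))
        (pvSetsIf (PySem.Str.strip l) p o)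
      = pvPatch (l :: ls) p o := by
  induction p with
  | nil => intro o; rfl
  | cons e p ih =>
    intro o
    simp only [List.map_cons, List.nodup_cons] at hnd
    have hany : ((l :: ls).any (pvUseL e.2.1))
        = (pvUse e.2.1 (PySem.Str.strip l) || ls.any (pvUseL e.2.1)) := by
      simp [pvUseL]
    rw [pvSetsIf_cons, pvPatch_cons (l :: ls), hany]
    by_cases h : pvUse e.2.1 (PySem.Str.strip l) = true
    · rw [List.filter_cons, if_neg (by simp [h]), if_pos (by rw [h]), h, Bool.true_or,
        if_pos rfl, ih hnd.2]
    · simp only [Bool.not_eq_true] at h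
      rw [List.filter_cons, if_pos (by simp [h]), if_neg (by rw [h]; exact Bool.false_ne_true),
        h, Bool.false_or, pvPatch_cons ls]
      by_cases ha : ls.any (pvUseL e.2.1) = true
      · rw [if_pos ha, if_pos ha, ← pvSetsIf_set _ _ _ _ hnd.1, ih hnd.2]
      · simp only [Bool.not_eq_true] at ha
        rw [if_neg (by rw [ha]; exact Bool.false_ne_true),
          if_neg (by rw [ha]; exact Bool.false_ne_true), ih hnd.2]

-- pulling the current line's resolutions out of the rest of B's run
theorem pvRunB_setsIf (ls : List String) (s : String) (p : List (Nat × String × String)) :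
    ∀ (X : List String), (∀ e ∈ p, e.1 < X.length) →
    (pvRunB (pvSetsIf s p X, []) ls).1 = pvSetsIf s p ((pvRunB (X, []) ls).1) := by
  induction p with
  | nil => intro X _; rfl
  | cons e p ih =>
    intro X hb
    by_cases h : pvUse e.2.1 s = true
    · simp only [pvSetsIf, List.foldl_cons, h, if_true] at ih ⊢
      rw [ih (X.set e.1 e.2.2) (fun e' he' => by
            simpa using hb e' (List.mem_cons_of_mem _ he')),
        pvRunB_set ls X [] e.1 e.2.2 (hb e List.mem_cons_self) (by simp)]
    · simp only [Bool.not_eq_true] at h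
      simp only [pvSetsIf, List.foldl_cons, h, Bool.false_eq_true, if_false] at ih ⊢
      exact ih X (fun e' he' => hb e' (List.mem_cons_of_mem _ he'))

theorem pvRunB_patch (ls : List String) : ∀ (o : List String) (p : List (Nat × String × String)),
    (∀ e ∈ p, e.1 < o.length) → (p.map (·.1)).Nodup →
    (pvRunB (o, p) ls).1 = pvPatch ls p ((pvRunB (o, []) ls).1) := by
  induction ls with
  | nil => intro o p _ _; exact (pvPatch_nil p o).symm
  | cons l ls ih =>
    intro o p hb hnd
    show (pvRunB (pvStepB (o, p) l) ls).1 = pvPatch (l :: ls) p ((pvRunB (pvStepB (o, []) l) ls).1)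
    rw [pvStepB_eq, pvStepB_eq]
    simp only [List.filter_nil, List.nil_append]
    have hsetsnil : pvSetsIf (PySem.Str.strip l) [] o = o := rfl
    rw [hsetsnil]
    have htplen : (if pvDefC (PySem.Str.strip l) then [pvCmt (PySem.Str.strip l)] else [l]).length = 1 := by
      by_cases hd : pvDefC (PySem.Str.strip l) = true
      · rw [if_pos hd]; rfl
      · rw [if_neg hd]; rfl
    -- left side: IH for the new pending list
    rw [ih _ (p.filter (fun e => !pvUse e.2.1 (PySem.Str.strip l)) ++
        (if pvDefC (PySem.Str.strip l) then [(o.length, pvVar (PySem.Str.strip l), l)] else []))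
        (by intro e he
            rcases List.mem_append.mp he with he | he
            · have h1 := hb e (List.mem_of_mem_filter he)
              rw [List.length_append, length_pvSetsIf, htplen]; omega
            · by_cases hd : pvDefC (PySem.Str.strip l) = true
              · rw [if_pos hd] at he
                simp only [List.mem_singleton] at he
                subst he
                rw [List.length_append, length_pvSetsIf, htplen]; simp
              · rw [if_neg hd] at he; simp at he)
        (by rw [List.map_append]
            apply List.Nodup.append
            · exact hnd.sublist (List.Sublist.map _ List.filter_sublist)
            · by_cases hd : pvDefC (PySem.Str.strip l) = true
              · rw [if_pos hd]; simp
              · rw [if_neg hd]; simp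
            · intro a ha hb'
              rcases List.mem_map.mp ha with ⟨e, he, rfl⟩
              rcases List.mem_map.mp hb' with ⟨e', he', heq⟩
              have h1 := hb e (List.mem_of_mem_filter he)
              by_cases hd : pvDefC (PySem.Str.strip l) = true
              · rw [if_pos hd] at he'
                simp only [List.mem_singleton] at he'
                subst he'
                simp only at heq
                omega
              · rw [if_neg hd] at he'; simp at he')]
    rw [pvSetsIf_append _ _ _ o hb, pvRunB_setsIf ls _ p _
        (fun e he => by have := hb e he; rw [List.length_append]; omega)]
    -- right side: IH for the singleton new pending list
    rw [ih _ (if pvDefC (PySem.Str.strip l) then [(o.length, pvVar (PySem.Str.strip l), l)] else [])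
        (by intro e he
            by_cases hd : pvDefC (PySem.Str.strip l) = true
            · rw [if_pos hd] at he
              simp only [List.mem_singleton] at he
              subst he
              rw [List.length_append, htplen]; simp
            · rw [if_neg hd] at he; simp at he)
        (by by_cases hd : pvDefC (PySem.Str.strip l) = true
            · rw [if_pos hd]; simp
            · rw [if_neg hd]; simp)]
    -- both sides are patches of the same core
    rw [pvPatch_append_p]
    rw [pvPatch_cons_line l ls p hnd]
    -- commute the (conditional, singleton) new patch with the patch over p
    have hnotin : o.length ∉ p.map (·.1) := by
      intro hmem
      rcases List.mem_map.mp hmem with ⟨e, he, hej⟩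
      have := hb e he; omega
    by_cases hd : pvDefC (PySem.Str.strip l) = true
    · rw [if_pos hd]
      rw [pvPatch_cons ls, pvPatch_cons ls, pvPatch_nil_p, pvPatch_nil_p]
      by_cases hu : ls.any (pvUseL (pvVar (PySem.Str.strip l))) = true
      · rw [if_pos hu, if_pos hu]
        exact (pvPatch_set (l :: ls) p _ _ hnotin _).symm
      · rw [if_neg hu, if_neg hu]
    · rw [if_neg hd]
      rw [pvPatch_nil_p, pvPatch_nil_p]

theorem pvB_main (ls : List String) : ∀ (o : List String),
    (pvRunB (o, []) ls).1 = o ++ pvGo ls := by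
  induction ls with
  | nil => intro o; simp [pvRunB, pvGo]
  | cons l ls ih =>
    intro o
    show (pvRunB (pvStepB (o, []) l) ls).1 = o ++ pvGo (l :: ls)
    rw [pvStepB_eq]
    simp only [List.filter_nil, List.nil_append]
    have hsetsnil : pvSetsIf (PySem.Str.strip l) [] o = o := rfl
    rw [hsetsnil]
    by_cases hd : pvDefC (PySem.Str.strip l) = true
    · simp only [hd, if_true]
      rw [pvRunB_patch ls _ [(o.length, pvVar (PySem.Str.strip l), l)]
          (by intro e he
              simp only [List.mem_singleton] at he
              subst he
              rw [List.length_append]; simp)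
          (by simp), ih]
      rw [pvPatch_cons ls, pvPatch_nil_p]
      by_cases hu : ls.any (pvUseL (pvVar (PySem.Str.strip l))) = true
      · rw [if_pos hu]
        rw [List.append_assoc, List.singleton_append, List.set_append, if_neg (by omega)]
        simp only [Nat.sub_self, List.set_cons_zero]
        simp only [pvGo, hd, if_true, hu, if_true]
      · simp only [Bool.not_eq_true] at hu
        rw [if_neg (by rw [hu]; exact Bool.false_ne_true)]
        simp only [pvGo, hd, if_true, hu, Bool.false_eq_true, if_false, List.append_assoc,
          List.singleton_append]
    · simp only [Bool.not_eq_true] at hd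
      simp only [hd, Bool.false_eq_true, if_false]
      rw [ih]
      simp only [pvGo, hd, Bool.false_eq_true, if_false, List.append_assoc, List.singleton_append]

-- ===== VERDICT (by name: the statement is the Claim_ definition above) =====
theorem optimize_generated_code_py_spec : Claim_equal_optimize_generated_code_py := by
  intro code _
  unfold Spec_optimize_generated_code_py optimize_generated_code_py optimize_generated_code_py_alt
  have hA := pvA_loop ((PySem.Str.split? code "\n").getD []) 0
    ((PySem.Str.split? code "\n").getD []) [] (PySem.Set.ofList []) (PySem.Set.ofList []) rfl
  have hB := pvB_main ((PySem.Str.split? code "\n").getD []) []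
  simp only [pvRunB] at hB
  simp only [Nat.cast_zero, List.nil_append] at hA hB
  exact congrArg (PySem.Str.join "\n") (hA.trans hB.symm)
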